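-- pv_equiv track=rewrite | github.com/cesarlarra33/Wevioo | nour/nv_test/test_2.py | analyser_texte_banque
-- ===== SOURCE A (Python) =====
-- from typing import Optional, Tuple
--
-- def analyser_texte_banque(texte: str, banques_connues: dict) -> Optional[str]:
--     """Analyse le texte extrait pour identifier une banque"""
--     if not texte:
--         return None
--
--     texte_lower = texte.lower()
--
--     # Recherche directe des banques connues
--     for nom_banque, variantes in banques_connues.items():
--         for variante in variantes:
--             if variante.lower() in texte_lower:
--                 return nom_banque
--
--     return None
-- ===== SOURCE B (Python) =====
-- from typing import Optional
--
-- def analyser_texte_banque(texte: str, banques_connues: dict) -> Optional[str]: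
--     """Analyse le texte extrait pour identifier une banque.
--     Index-based: pre-build the set of all lowercase substrings of the text up to
--     the longest variant length, then each variant check is one hash lookup."""
--     if not texte:
--         return None
--     t = texte.lower()
--     n = len(t)
--     maxlen = 0
--     for variantes in banques_connues.values():
--         for v in variantes:
--             if len(v) > maxlen:
--                 maxlen = len(v)
--     subs = set()
--     for l in range(1, min(maxlen, n) + 1):
--         for i in range(n - l + 1):
--             subs.add(t[i:i + l])
--     for nom_banque, variantes in banques_connues.items():
--         for v in variantes:
--             vl = v.lower()
--             if vl == "" or vl in subs:
--                 return nom_banque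
--     return None
-- ===== Notes on version B (the rewrite author's own statement) =====
-- stated objective: alternative
-- what changed: Instead of running a substring search over the text for every variant, B builds once the set of all lowercase substrings of the text up to the longest variant length and answers each variant check with a single set lookup.
import Mathlib
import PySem

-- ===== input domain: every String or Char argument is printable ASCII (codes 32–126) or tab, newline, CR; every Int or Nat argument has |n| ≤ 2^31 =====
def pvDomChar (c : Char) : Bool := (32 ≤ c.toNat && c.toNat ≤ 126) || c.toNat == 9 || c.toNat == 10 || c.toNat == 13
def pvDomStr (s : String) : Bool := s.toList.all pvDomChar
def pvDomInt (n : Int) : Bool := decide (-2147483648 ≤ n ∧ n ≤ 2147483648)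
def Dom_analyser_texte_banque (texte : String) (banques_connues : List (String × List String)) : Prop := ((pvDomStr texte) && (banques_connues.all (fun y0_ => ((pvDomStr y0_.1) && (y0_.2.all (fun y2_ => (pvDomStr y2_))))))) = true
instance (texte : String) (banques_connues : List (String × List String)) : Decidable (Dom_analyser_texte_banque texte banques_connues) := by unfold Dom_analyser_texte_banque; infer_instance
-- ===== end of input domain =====

-- B replaces A's per-variant substring scans by a set of the text's lowercase
-- substrings (up to the longest variant length) built once, so that each variant
-- check becomes a single set lookup (objective: alternative algorithm).

-- ===== PORT A =====
-- inner 'for variante in variantes' loop with its early return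
def pvAvars (tl : String) (nom : String) : List String → Option String
  | [] => none
  | v :: rest =>
    if PySem.Str.isIn (PySem.Str.lower v) tl then some nom else pvAvars tl nom rest

-- outer 'for nom_banque, variantes in banques_connues.items()' loop
def pvAbanks (tl : String) : List (String × List String) → Option String
  | [] => none
  | (nom, vs) :: rest =>
    match pvAvars tl nom vs with
    | some r => some r
    | none => pvAbanks tl rest

def analyser_texte_banque (texte : String) (banques_connues : List (String × List String)) : Option String :=
  if texte.toList = [] then none
  else pvAbanks (PySem.Str.lower texte) banques_connues

-- ===== PORT B =====
-- maxlen = length of the longest variant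
def pvBmaxlen (banques : List (String × List String)) : Int :=
  banques.foldl
    (fun m p => p.2.foldl (fun m v => if m < PySem.Str.len v then PySem.Str.len v else m) m) 0

-- subs = { t[i:i+l] | 1 ≤ l ≤ min(maxlen, n), 0 ≤ i ≤ n-l }, built as a Python set
def pvBsubs (tl : String) (maxlen : Int) : PySem.Set String :=
  (PySem.List.pyRange 1 (min maxlen (PySem.Str.len tl) + 1) 1).foldl
    (fun s l =>
      (PySem.List.pyRange 0 (PySem.Str.len tl - l + 1) 1).foldl
        (fun s i => PySem.Set.add s (PySem.Str.slice tl (some i) (some (i + l)))) s)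
    PySem.Set.empty

-- final scan: each variant check is one lookup in subs
def pvBvars (subs : PySem.Set String) (nom : String) : List String → Option String
  | [] => none
  | v :: rest =>
    if PySem.Str.lower v = "" ∨ PySem.Str.lower v ∈ subs then some nom
    else pvBvars subs nom rest

def pvBbanks (subs : PySem.Set String) : List (String × List String) → Option String
  | [] => none
  | (nom, vs) :: rest =>
    match pvBvars subs nom vs with
    | some r => some r
    | none => pvBbanks subs rest

def analyser_texte_banque_alt (texte : String) (banques_connues : List (String × List String)) : Option String :=
  if texte.toList = [] then none
  else pvBbanks (pvBsubs (PySem.Str.lower texte) (pvBmaxlen banques_connues)) banques_connues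

-- ===== PRECONDITION & SPEC =====
def Spec_analyser_texte_banque (texte : String) (banques_connues : List (String × List String)) (out : Option String) : Prop := out = analyser_texte_banque_alt texte banques_connues
instance (texte : String) (banques_connues : List (String × List String)) (out : Option String) : Decidable (Spec_analyser_texte_banque texte banques_connues out) := by unfold Spec_analyser_texte_banque; infer_instance

-- ===== CLAIM (what is proved, stated in full; the proofs are below) =====
def Claim_equal_analyser_texte_banque : Prop := ∀ (texte : String) (banques_connues : List (String × List String)), Dom_analyser_texte_banque texte banques_connues → Spec_analyser_texte_banque texte banques_connues (analyser_texte_banque texte banques_connues)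

-- ===== LEMMAS AND PROOFS =====

-- the inner maxlen fold is a running max
theorem pvInnerMax_le (vs : List String) (m : Int) :
    m ≤ vs.foldl (fun m v => if m < PySem.Str.len v then PySem.Str.len v else m) m ∧
    ∀ v ∈ vs, PySem.Str.len v ≤ vs.foldl (fun m v => if m < PySem.Str.len v then PySem.Str.len v else m) m := by
  induction vs generalizing m with
  | nil => simp
  | cons w t ih =>
    simp only [List.foldl_cons, List.mem_cons]
    constructor
    · refine le_trans ?_ (ih _).1
      split <;> omega
    · rintro v (rfl | hv)
      · refine le_trans ?_ (ih _).1
        split <;> omega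
      · exact (ih _).2 v hv

theorem pvBmaxlen_bound (banques : List (String × List String)) :
    0 ≤ pvBmaxlen banques ∧
    ∀ p ∈ banques, ∀ v ∈ p.2, PySem.Str.len v ≤ pvBmaxlen banques := by
  unfold pvBmaxlen
  generalize (0 : Int) = m
  induction banques generalizing m with
  | nil => simp
  | cons q t ih =>
    simp only [List.foldl_cons, List.mem_cons]
    refine ⟨le_trans (pvInnerMax_le q.2 m).1 (ih _).1, ?_⟩
    rintro p (rfl | hp) v hv
    · exact le_trans ((pvInnerMax_le p.2 m).2 v hv) (ih _).1
    · exact (ih _).2 p hp v hv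

-- membership in the nested substring-building fold
theorem pvMem_nested_fold (L : List Int) (R : Int → List Int) (y : String)
    (f : Int → Int → String) (s0 : PySem.Set String) :
    y ∈ L.foldl (fun s l => (R l).foldl (fun s i => PySem.Set.add s (f l i)) s) s0 ↔
    y ∈ s0 ∨ ∃ l ∈ L, ∃ i ∈ R l, y = f l i := by
  induction L generalizing s0 with
  | nil => simp
  | cons a t ih =>
    simp only [List.foldl_cons, ih, PySem.Set.mem_foldl_add, List.mem_cons]
    constructor
    · rintro ((h | ⟨i, hi, rfl⟩) | ⟨l, hl, i, hi, rfl⟩)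
      · exact Or.inl h
      · exact Or.inr ⟨a, Or.inl rfl, i, hi, rfl⟩
      · exact Or.inr ⟨l, Or.inr hl, i, hi, rfl⟩
    · rintro (h | ⟨l, (rfl | hl), i, hi, rfl⟩)
      · exact Or.inl (Or.inl h)
      · exact Or.inl (Or.inr ⟨i, hi, rfl⟩)
      · exact Or.inr ⟨l, hl, i, hi, rfl⟩

theorem pvMem_subs (tl : String) (maxlen : Int) (y : String) :
    y ∈ pvBsubs tl maxlen ↔
    ∃ l, 1 ≤ l ∧ l < min maxlen (PySem.Str.len tl) + 1 ∧
      ∃ i, 0 ≤ i ∧ i < PySem.Str.len tl - l + 1 ∧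
        y = PySem.Str.slice tl (some i) (some (i + l)) := by
  unfold pvBsubs
  rw [pvMem_nested_fold (PySem.List.pyRange 1 (min maxlen (PySem.Str.len tl) + 1) 1)
      (fun l => PySem.List.pyRange 0 (PySem.Str.len tl - l + 1) 1) y
      (fun l i => PySem.Str.slice tl (some i) (some (i + l)))]
  simp only [PySem.Set.empty, List.not_mem_nil, false_or, PySem.List.mem_pyRange_one,
    and_assoc]

-- the per-variant tests agree for any variant no longer than maxlen
theorem pvCond_eq (tl : String) (maxlen : Int) (vl : String)
    (hb : PySem.Str.len vl ≤ maxlen) :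
    (vl = "" ∨ vl ∈ pvBsubs tl maxlen) ↔ PySem.Str.isIn vl tl = true := by
  rw [PySem.Str.isIn_eq, PySem.Chars.isIn_iff_infix, pvMem_subs]
  constructor
  · rintro (rfl | ⟨l, h1, h2, i, h3, h4, rfl⟩)
    · exact ⟨[], tl.toList, by simp⟩
    · obtain ⟨i', rfl⟩ := Int.eq_ofNat_of_zero_le h3
      obtain ⟨l', rfl⟩ := Int.eq_ofNat_of_zero_le (by omega : (0:Int) ≤ l)
      have : ((i' : Int) + l') = ((i' + l' : Nat) : Int) := by push_cast; ring
      rw [this]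
      simp only [PySem.Str.toList_slice, PySem.Chars.slice_eq_listSlice,
        PySem.List.slice_natCast, Nat.add_sub_cancel_left]
      exact ((tl.toList.drop i').take_prefix l').isInfix.trans (tl.toList.drop_suffix i').isInfix
  · rintro ⟨pre, suf, heq⟩
    by_cases hvl : vl.toList = []
    · exact Or.inl (String.toList_inj.mp (by simp [hvl]))
    · right
      have hlen : tl.toList.length = pre.length + vl.toList.length + suf.length := by
        rw [← heq]; simp; omega
      refine ⟨(vl.toList.length : Int), ?_, ?_, (pre.length : Int), by positivity, ?_, ?_⟩
      · have : vl.toList.length ≠ 0 := fun h => hvl (List.eq_nil_of_length_eq_zero h)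
        omega
      · have h1 : PySem.Str.len vl = (vl.toList.length : Int) := PySem.Str.len_eq vl
        have h2 : PySem.Str.len tl = (tl.toList.length : Int) := PySem.Str.len_eq tl
        omega
      · have h2 : PySem.Str.len tl = (tl.toList.length : Int) := PySem.Str.len_eq tl
        omega
      · apply String.toList_inj.mp
        have : ((pre.length : Int) + vl.toList.length) = ((pre.length + vl.toList.length : Nat) : Int) := by
          push_cast; ring
        rw [this]
        simp only [PySem.Str.toList_slice, PySem.Chars.slice_eq_listSlice,
          PySem.List.slice_natCast, Nat.add_sub_cancel_left]
        rw [← heq, List.append_assoc, List.drop_left, List.take_left]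

theorem pvLen_lower (v : String) : PySem.Str.len (PySem.Str.lower v) = PySem.Str.len v := by
  simp [PySem.Str.len_eq, PySem.Str.toList_lower, PySem.Chars.lower]

theorem pvVars_eq (tl : String) (maxlen : Int) (nom : String) (vs : List String)
    (hb : ∀ v ∈ vs, PySem.Str.len v ≤ maxlen) :
    pvAvars tl nom vs = pvBvars (pvBsubs tl maxlen) nom vs := by
  induction vs with
  | nil => rfl
  | cons v t ih =>
    have hc := pvCond_eq tl maxlen (PySem.Str.lower v)
      (by rw [pvLen_lower]; exact hb v (by simp))
    simp only [pvAvars, pvBvars]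
    by_cases h : PySem.Str.isIn (PySem.Str.lower v) tl = true
    · rw [if_pos h, if_pos (hc.mpr h)]
    · rw [if_neg h, if_neg (fun hx => h (hc.mp hx))]
      exact ih (fun w hw => hb w (List.mem_cons_of_mem _ hw))

theorem pvScan_eq (tl : String) (maxlen : Int) (banques : List (String × List String))
    (hb : ∀ p ∈ banques, ∀ v ∈ p.2, PySem.Str.len v ≤ maxlen) :
    pvAbanks tl banques = pvBbanks (pvBsubs tl maxlen) banques := by
  induction banques with
  | nil => rfl
  | cons q t ih =>
    obtain ⟨nom, vs⟩ := q
    simp only [pvAbanks, pvBbanks]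
    rw [pvVars_eq tl maxlen nom vs (fun v hv => hb (nom, vs) (by simp) v hv)]
    cases pvBvars (pvBsubs tl maxlen) nom vs with
    | some r => rfl
    | none => exact ih (fun p hp => hb p (List.mem_cons_of_mem _ hp))

-- ===== VERDICT (by name: the statement is the Claim_ definition above) =====
theorem analyser_texte_banque_spec : Claim_equal_analyser_texte_banque := by
  intro texte banques _
  unfold Spec_analyser_texte_banque analyser_texte_banque analyser_texte_banque_alt
  split
  · rfl
  · exact pvScan_eq _ _ banques (pvBmaxlen_bound banques).2
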